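-- pv_equiv track=rewrite | github.com/ethankgm/Python-Project- | math_challenges.py | nearest_prime
-- ===== SOURCE A (Python) =====
-- def is_prime(n):
--     if n <= 1:
--         return False
--
--     for divisor in range(2, n // 2 + 1):
--         if n % divisor == 0:
--             return False
--     return True
--
-- def nearest_prime(n):
--     prime_found = False
--     while not prime_found:
--         if is_prime(n):
--             prime_found = True
--         else:
--             n = n + 1
--     return n
-- ===== SOURCE B (Python) =====
-- def _is_odd_prime(m):
--     d = 3
--     while d * d <= m:
--         if m % d == 0:
--             return False
--         d += 2
--     return True
--
-- def nearest_prime(n):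
--     c = n if n > 2 else 2
--     if c == 2:
--         return 2
--     if c % 2 == 0:
--         c = c + 1
--     while not _is_odd_prime(c):
--         c = c + 2
--     return c
-- ===== Notes on version B (the rewrite author's own statement) =====
-- stated objective: faster
-- what changed: A scans every integer upward testing each candidate by trial division over all divisors up to n//2; B jumps straight to max(n,2), handles 2, then walks odd candidates only, testing each by trial division over odd divisors d with d*d <= candidate.
import Mathlib
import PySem

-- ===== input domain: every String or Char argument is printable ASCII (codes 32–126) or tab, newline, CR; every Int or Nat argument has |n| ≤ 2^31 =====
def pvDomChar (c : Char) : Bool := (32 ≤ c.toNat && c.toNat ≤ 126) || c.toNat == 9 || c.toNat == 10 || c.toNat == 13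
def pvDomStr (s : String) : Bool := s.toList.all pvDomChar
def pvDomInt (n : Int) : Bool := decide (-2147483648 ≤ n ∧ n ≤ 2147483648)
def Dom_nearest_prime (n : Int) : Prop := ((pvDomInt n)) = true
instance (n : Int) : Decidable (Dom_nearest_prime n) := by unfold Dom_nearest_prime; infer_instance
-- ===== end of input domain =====

-- B replaces A's scan-every-integer-with-trial-division-up-to-n//2 by: start at max(n,2),
-- handle 2, then test only odd candidates by odd trial divisors d with d*d <= candidate.
-- The Nat fuel on each loop is only a totality guard; the proofs show it never runs out.

-- ===== PORT A =====
-- is_prime: trial division over range(2, n//2 + 1); the early-return-False loop is the `any` fold.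
def pvIsPrimeA (n : Int) : Bool :=
  if n ≤ 1 then false
  else !((PySem.List.pyRange 2 (PySem.Int.floordiv n 2 + 1) 1).any
          (fun d => PySem.Int.mod n d == 0))

-- nearest_prime's while-loop; the fuel always suffices (Bertrand's postulate, below).
def pvLoopA : Nat → Int → Int
  | 0, n => n
  | fuel + 1, n => if pvIsPrimeA n then n else pvLoopA fuel (n + 1)

def nearest_prime (n : Int) : Int := pvLoopA ((2 - n).toNat + 2 * n.toNat + 4) n

-- ===== PORT B =====
-- _is_odd_prime's while-loop over odd divisors d with d*d <= m; fuel always suffices.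
def pvOddLoop : Nat → Int → Int → Bool
  | 0, _, _ => true
  | fuel + 1, m, d =>
    if d * d ≤ m then
      if PySem.Int.mod m d == 0 then false else pvOddLoop fuel m (d + 2)
    else true

-- B's candidate loop over odd candidates; fuel always suffices (Bertrand's postulate).
def pvSearchB : Nat → Int → Int
  | 0, c => c
  | fuel + 1, c => if pvOddLoop (c.toNat + 4) c 3 then c else pvSearchB fuel (c + 2)

def nearest_prime_alt (n : Int) : Int :=
  let c := if n > 2 then n else 2
  if c == 2 then 2
  else
    let c := if PySem.Int.mod c 2 == 0 then c + 1 else c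
    pvSearchB (2 * c.toNat + 4) c

-- ===== PRECONDITION & SPEC =====
def Spec_nearest_prime (n : Int) (out : Int) : Prop := out = nearest_prime_alt n
instance (n : Int) (out : Int) : Decidable (Spec_nearest_prime n out) := by unfold Spec_nearest_prime; infer_instance

-- ===== CLAIM (what is proved, stated in full; the proofs are below) =====
def Claim_equal_nearest_prime : Prop := ∀ (n : Int), Dom_nearest_prime n → Spec_nearest_prime n (nearest_prime n)

-- ===== LEMMAS AND PROOFS =====

theorem pvIsPrimeA_of_prime (p : Nat) (hp : p.Prime) : pvIsPrimeA ((p : Int)) = true := by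
  have h2 : 2 ≤ p := hp.two_le
  unfold pvIsPrimeA
  rw [if_neg (by exact_mod_cast by omega)]
  simp only [Bool.not_eq_true', List.any_eq_false]
  intro d hd
  rw [PySem.List.mem_pyRange_one,
      PySem.Int.floordiv_eq_ediv_of_pos (by norm_num : (0:Int) < 2)] at hd
  have hd2 : 2 ≤ d := hd.1
  have hdlt : d < (p : Int) := by omega
  simp only [beq_iff_eq]
  intro hmod
  have hdvd : d ∣ (p : Int) := (PySem.Int.mod_eq_zero_iff_dvd _ _).mp hmod
  have hnat : d.toNat ∣ p := by
    have : (d.toNat : Int) ∣ (p : Int) := by rwa [Int.toNat_of_nonneg (by omega)]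
    exact_mod_cast this
  rcases hp.eq_one_or_self_of_dvd _ hnat with h | h <;> omega

theorem pvIsPrimeA_iff (m : Int) : pvIsPrimeA m = true ↔ 2 ≤ m ∧ m.toNat.Prime := by
  constructor
  · intro h
    by_cases hm : m ≤ 1
    · simp [pvIsPrimeA, hm] at h
    · rw [not_le] at hm
      refine ⟨by omega, ?_⟩
      by_contra hnp
      have hqp := Nat.minFac_prime (by omega : m.toNat ≠ 1)
      have hqd := Nat.minFac_dvd m.toNat
      have hsq := Nat.minFac_sq_le_self (by omega) hnp
      set q := m.toNat.minFac with hqdef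
      have hq2 : 2 ≤ q := hqp.two_le
      have hqq : 2 * q ≤ m.toNat := by nlinarith [hsq]
      unfold pvIsPrimeA at h
      rw [if_neg (by omega)] at h
      simp only [Bool.not_eq_true', List.any_eq_false] at h
      have hmem : ((q : Int)) ∈ PySem.List.pyRange 2 (PySem.Int.floordiv m 2 + 1) 1 := by
        rw [PySem.List.mem_pyRange_one,
            PySem.Int.floordiv_eq_ediv_of_pos (by norm_num : (0:Int) < 2)]
        omega
      have hq := h _ hmem
      simp only [beq_iff_eq] at hq
      apply hq
      rw [PySem.Int.mod_eq_zero_iff_dvd]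
      have hcast : ((q : Int)) ∣ ((m.toNat : Nat) : Int) := Int.natCast_dvd_natCast.mpr hqd
      rwa [Int.toNat_of_nonneg (by omega)] at hcast
  · rintro ⟨h2, hp⟩
    have hm : m = ((m.toNat : Nat) : Int) := (Int.toNat_of_nonneg (by omega)).symm
    rw [hm]; exact pvIsPrimeA_of_prime _ hp

-- Characterisation of pvOddLoop, given enough fuel.
theorem pvOddLoop_iff (fuel : Nat) (m d : Int) (hd : 3 ≤ d)
    (hfuel : (m + 3 - d).toNat ≤ fuel) :
    pvOddLoop fuel m d = true ↔
      ∀ e : Int, d ≤ e → e * e ≤ m → 2 ∣ (e - d) → ¬ (e ∣ m) := by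
  induction fuel generalizing d with
  | zero =>
    simp only [pvOddLoop, true_iff]
    intro e he hee _ _
    have hee' : e ≤ e * e := by nlinarith
    omega
  | succ fuel ih =>
    simp only [pvOddLoop]
    by_cases hle : d * d ≤ m
    · rw [if_pos hle]
      by_cases hmod : (PySem.Int.mod m d == 0) = true
      · simp only [beq_iff_eq] at hmod
        rw [if_pos (by simpa [beq_iff_eq] using hmod)]
        simp only [Bool.false_eq_true, false_iff, not_forall]
        exact ⟨d, le_refl d, hle, ⟨0, by ring⟩, by
          simpa using (PySem.Int.mod_eq_zero_iff_dvd m d).mp hmod⟩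
      · rw [if_neg hmod]
        have hdec : (m + 3 - (d + 2)).toNat ≤ fuel := by
          have hm : 0 ≤ m := le_trans (mul_self_nonneg d) hle
          have h1 : 2 * d - 1 ≤ m := by nlinarith [sq_nonneg (d - 1)]
          omega
        rw [ih (d + 2) (by omega) hdec]
        constructor
        · intro h e he hee hpar
          rcases eq_or_lt_of_le he with he' | he'
          · intro hdvd
            rw [← he'] at hdvd
            exact hmod (by simpa [beq_iff_eq] using (PySem.Int.mod_eq_zero_iff_dvd m d).mpr hdvd)
          · have h2e : d + 2 ≤ e := by omega
            exact h e h2e hee (by omega)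
        · intro h e he hee hpar
          exact h e (by omega) hee (by omega)
    · rw [if_neg hle]
      simp only [true_iff]
      intro e he hee _ _
      nlinarith

-- Fuel-instantiated test B: for odd m ≥ 3 it is primality of m.
theorem pvOddLoop3_iff (m : Int) (hm : 3 ≤ m) (hodd : m % 2 = 1) :
    pvOddLoop (m.toNat + 4) m 3 = true ↔ m.toNat.Prime := by
  rw [pvOddLoop_iff (m.toNat + 4) m 3 (le_refl 3) (by omega)]
  constructor
  · intro h
    by_contra hnp
    have hqp := Nat.minFac_prime (by omega : m.toNat ≠ 1)
    have hqd := Nat.minFac_dvd m.toNat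
    have hsq := Nat.minFac_sq_le_self (by omega) hnp
    set q := m.toNat.minFac with hqdef
    have hq2 : 2 ≤ q := hqp.two_le
    have hq2' : q ≠ 2 := by
      intro h2
      have : 2 ∣ m.toNat := h2 ▸ hqd
      omega
    have hqodd : ¬ (2 ∣ q) := by
      intro h2; rcases hqp.eq_one_or_self_of_dvd 2 h2 with h' | h' <;> omega
    have hsq' : q * q ≤ m.toNat := by nlinarith [hsq]
    apply h ((q : Int)) (by omega) (by
      have : ((q * q : Nat) : Int) ≤ ((m.toNat : Nat) : Int) := by exact_mod_cast hsq'
      push_cast at this; omega) (by omega)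
    have hcast : ((q : Int)) ∣ ((m.toNat : Nat) : Int) := Int.natCast_dvd_natCast.mpr hqd
    rwa [Int.toNat_of_nonneg (by omega)] at hcast
  · intro hp e he3 hee _ hdvd
    have hnat : e.toNat ∣ m.toNat := by
      have : ((e.toNat : Nat) : Int) ∣ ((m.toNat : Nat) : Int) := by
        rw [Int.toNat_of_nonneg (by omega : (0:Int) ≤ e), Int.toNat_of_nonneg (by omega : (0:Int) ≤ m)]
        exact hdvd
      exact_mod_cast this
    rcases hp.eq_one_or_self_of_dvd _ hnat with h | h
    · omega
    · have : e = m := by omega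
      nlinarith

theorem pvLoopA_eq (m : Int) (hm : pvIsPrimeA m = true) :
    ∀ (k : Nat) (fuel : Nat) (n : Int), k ≤ fuel → m = n + (k : Int) →
      (∀ j : Int, n ≤ j → j < m → pvIsPrimeA j = false) → pvLoopA fuel n = m := by
  intro k
  induction k with
  | zero =>
    intro fuel n _ h _
    have hn : n = m := by omega
    subst hn
    cases fuel with
    | zero => simp [pvLoopA]
    | succ fuel => simp [pvLoopA, hm]
  | succ k ih =>
    intro fuel n hkf h hmin
    cases fuel with
    | zero => omega
    | succ fuel =>
      have hfalse : pvIsPrimeA n = false := hmin n le_rfl (by omega)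
      simp only [pvLoopA, hfalse, Bool.false_eq_true, if_false]
      exact ih fuel (n + 1) (by omega) (by push_cast at h ⊢; omega)
        (fun j hj hjm => hmin j (by omega) hjm)

theorem pvSearchB_eq (m : Int) (hm : pvOddLoop (m.toNat + 4) m 3 = true) :
    ∀ (k : Nat) (fuel : Nat) (c : Int), k ≤ fuel → m = c + 2 * (k : Int) →
      (∀ i : Nat, i < k → pvOddLoop ((c + 2 * (i : Int)).toNat + 4) (c + 2 * (i : Int)) 3 = false) →
      pvSearchB fuel c = m := by
  intro k
  induction k with
  | zero =>
    intro fuel c _ h _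
    have hc : c = m := by omega
    subst hc
    cases fuel with
    | zero => simp [pvSearchB]
    | succ fuel => simp [pvSearchB, hm]
  | succ k ih =>
    intro fuel c hkf h hmin
    cases fuel with
    | zero => omega
    | succ fuel =>
      have hfalse : pvOddLoop (c.toNat + 4) c 3 = false := by
        have h0 := hmin 0 (by omega)
        simpa using h0
      simp only [pvSearchB, hfalse, Bool.false_eq_true, if_false]
      refine ih fuel (c + 2) (by omega) (by push_cast at h ⊢; omega) (fun i hi => ?_)
      have h1 := hmin (i + 1) (by omega)
      have he : c + 2 + 2 * ((i : Nat) : Int) = c + 2 * (((i + 1 : Nat) : Nat) : Int) := by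
        push_cast; ring
      rw [he]; exact h1

-- ===== VERDICT (by name: the statement is the Claim_ definition above) =====
theorem nearest_prime_spec : Claim_equal_nearest_prime := by
  intro n _
  show nearest_prime n = nearest_prime_alt n
  unfold nearest_prime
  by_cases h2 : n > 2
  · -- n ≥ 3
    have hmod2 : PySem.Int.mod n 2 = n % 2 := PySem.Int.mod_eq_emod_of_pos (by norm_num)
    obtain ⟨hpN, hpp⟩ := Nat.find_spec (Nat.exists_infinite_primes n.toNat)
    set p := Nat.find (Nat.exists_infinite_primes n.toNat) with hpdef
    have hmin : ∀ q : Nat, q < p → ¬ (n.toNat ≤ q ∧ q.Prime) :=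
      fun q hq => Nat.find_min (Nat.exists_infinite_primes n.toNat) hq
    -- Bertrand's postulate: the least prime ≥ n.toNat is at most 2 * n.toNat
    obtain ⟨q, hqp, hq1, hq2⟩ := Nat.exists_prime_lt_and_le_two_mul n.toNat (by omega)
    have hple : p ≤ 2 * n.toNat := le_trans (Nat.find_le ⟨by omega, hqp⟩) hq2
    have hp2 : 2 ≤ p := hpp.two_le
    have hp3 : 3 ≤ p := by
      rcases Nat.lt_or_ge p 3 with h | h
      · omega
      · exact h
    have hpodd : ¬ (2 ∣ p) := by
      intro hd; rcases hpp.eq_one_or_self_of_dvd 2 hd with h | h <;> omega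
    have hp1 : p % 2 = 1 := by omega
    have hM : n ≤ (p : Int) := by omega
    -- A side
    have hA : pvLoopA ((2 - n).toNat + 2 * n.toNat + 4) n = (p : Int) := by
      apply pvLoopA_eq _ ((pvIsPrimeA_iff _).mpr ⟨by omega, by simpa using hpp⟩)
        (((p : Int) - n).toNat) _ n (by omega) (by omega)
      intro j hj hjm
      cases hb : pvIsPrimeA j
      · rfl
      · exfalso
        obtain ⟨hj2, hjp⟩ := (pvIsPrimeA_iff j).mp hb
        exact hmin j.toNat (by omega) ⟨by omega, hjp⟩
    rw [hA]
    -- B side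
    have hne : (n == 2) = false := by simp; omega
    have halt : nearest_prime_alt n
        = pvSearchB (2 * (if PySem.Int.mod n 2 == 0 then n + 1 else n).toNat + 4)
            (if PySem.Int.mod n 2 == 0 then n + 1 else n) := by
      simp only [nearest_prime_alt, if_pos h2, hne]
      rfl
    rw [halt]
    set c : Int := if PySem.Int.mod n 2 == 0 then n + 1 else n with hcdef
    have hc1 : c % 2 = 1 := by
      rw [hcdef, hmod2]
      split_ifs with h
      · simp only [beq_iff_eq] at h; omega
      · simp only [beq_iff_eq] at h; omega
    have hcn : n ≤ c ∧ c ≤ n + 1 ∧ (n % 2 = 1 → c = n) := by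
      rw [hcdef, hmod2]
      split_ifs with h
      · simp only [beq_iff_eq] at h; omega
      · simp only [beq_iff_eq] at h; omega
    have hcM : c ≤ (p : Int) := by omega
    have hpar : (2 : Int) ∣ ((p : Int) - c) := by omega
    have hmB : pvOddLoop (((p : Int)).toNat + 4) ((p : Int)) 3 = true := by
      rw [pvOddLoop3_iff _ (by omega) (by omega)]
      simpa using hpp
    symm
    apply pvSearchB_eq _ hmB ((((p : Int) - c) / 2).toNat) _ c (by omega) (by omega)
    intro i hi
    cases hb : pvOddLoop ((c + 2 * ((i : Nat) : Int)).toNat + 4) (c + 2 * ((i : Nat) : Int)) 3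
    · rfl
    · exfalso
      have hj3 : (3 : Int) ≤ c + 2 * ((i : Nat) : Int) := by omega
      have hjodd : (c + 2 * ((i : Nat) : Int)) % 2 = 1 := by omega
      have hjlt : c + 2 * ((i : Nat) : Int) < (p : Int) := by omega
      have hjp := (pvOddLoop3_iff _ hj3 hjodd).mp hb
      exact hmin _ (by omega) ⟨by omega, hjp⟩
  · -- n ≤ 2: both sides are 2
    have halt : nearest_prime_alt n = 2 := by
      simp [nearest_prime_alt, h2]
    rw [halt]
    apply pvLoopA_eq 2 (by decide) ((2 - n).toNat) _ n (by omega) (by omega)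
    intro j hj hjm
    unfold pvIsPrimeA
    rw [if_pos (by omega)]
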